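-- pv_equiv track=rewrite | github.com/torshepherd/textual-bee | textual_bee/__init__.py | columnify
-- ===== SOURCE A (Python) =====
-- from typing import List, Literal, Optional, Tuple
--
-- def columnify(list_of_words: List[str], col_size: int):
--     columns = []
--
--     remaining = list_of_words.copy()
--     while len(remaining) > 0:
--         current_col = []
--         for _ in range(col_size):
--             if len(remaining) == 0:
--                 break
--             current_col.append(remaining.pop())
--         columns.append(current_col)
--     return columns
-- ===== SOURCE B (Python) =====
-- def columnify(list_of_words, col_size):
--     rev = list_of_words[::-1]
--     return [rev[i:i + col_size] for i in range(0, len(rev), col_size)]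
-- ===== Notes on version B (the rewrite author's own statement) =====
-- stated objective: simpler
-- what changed: Replaces A's while-loop that pops elements one-by-one off the tail of a mutable copy with one up-front reversal plus bulk stride slicing in a comprehension.
-- outside the precondition, e.g. on columnify([], 0): A returns [], B raises ValueError; on columnify([], -2): A returns [], B returns []
import Mathlib
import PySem

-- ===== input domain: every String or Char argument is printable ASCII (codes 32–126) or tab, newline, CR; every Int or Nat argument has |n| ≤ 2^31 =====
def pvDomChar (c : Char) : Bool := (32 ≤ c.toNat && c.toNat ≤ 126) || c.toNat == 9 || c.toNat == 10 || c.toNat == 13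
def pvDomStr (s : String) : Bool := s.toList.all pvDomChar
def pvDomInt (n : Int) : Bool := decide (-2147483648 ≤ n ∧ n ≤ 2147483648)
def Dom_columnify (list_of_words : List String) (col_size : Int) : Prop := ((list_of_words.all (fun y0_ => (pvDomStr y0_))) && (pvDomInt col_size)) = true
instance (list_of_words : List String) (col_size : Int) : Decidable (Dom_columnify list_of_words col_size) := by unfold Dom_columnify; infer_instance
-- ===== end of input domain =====

-- B replaces A's pop-from-the-tail while-loop by one up-front reversal plus stride slicing (simpler, same cost).

-- ===== PORT A =====
-- inner 'for _ in range(col_size)' loop: pops the last element of `remaining` into `current_col`,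
-- breaking early when `remaining` is empty (getLastD's default is never read: the branch guards emptiness)
def columnifyInner : Nat → List String → List String → List String × List String
  | 0, current_col, remaining => (current_col, remaining)
  | k+1, current_col, remaining =>
    if remaining.length = 0 then (current_col, remaining)
    else columnifyInner k (current_col ++ [remaining.getLastD ""]) remaining.dropLast

-- outer 'while len(remaining) > 0' loop; fuel = initial length bounds the iteration count
-- (each iteration removes at least one element when col_size ≥ 1; outside Pre_ A does not terminate)
def columnifyOuter (colN : Nat) : Nat → List (List String) → List String → List (List String)
  | 0, columns, _ => columns
  | fuel+1, columns, remaining =>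
    if remaining.length = 0 then columns
    else
      let p := columnifyInner colN [] remaining
      columnifyOuter colN fuel (columns ++ [p.1]) p.2

def columnify (list_of_words : List String) (col_size : Int) : List (List String) :=
  columnifyOuter col_size.toNat list_of_words.length [] list_of_words

-- ===== PORT B =====
def columnify_alt (list_of_words : List String) (col_size : Int) : List (List String) :=
  let rev := (PySem.List.slice? list_of_words none none (-1)).getD []
  (PySem.List.pyRange 0 (rev.length : Int) col_size).map
    (fun i => PySem.List.slice rev (some i) (some (i + col_size)))

-- ===== PRECONDITION & SPEC =====
-- Pre_ excludes col_size < 1: there A loops forever on every nonempty list, and on the empty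
-- list A returns [] while B raises ValueError (col_size = 0) or also returns [] (col_size < 0).
def Pre_columnify (list_of_words : List String) (col_size : Int) : Prop := 1 ≤ col_size
instance (list_of_words : List String) (col_size : Int) : Decidable (Pre_columnify list_of_words col_size) := by unfold Pre_columnify; infer_instance
def pvWitness_columnify : List String × Int := (["bee", "text", "ual"], 2)

def Spec_columnify (list_of_words : List String) (col_size : Int) (out : List (List String)) : Prop := out = columnify_alt list_of_words col_size
instance (list_of_words : List String) (col_size : Int) (out : List (List String)) : Decidable (Spec_columnify list_of_words col_size out) := by unfold Spec_columnify; infer_instance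

-- ===== CLAIM (what is proved, stated in full; the proofs are below) =====
def Claim_equal_columnify : Prop := ∀ (list_of_words : List String) (col_size : Int), Dom_columnify list_of_words col_size → Pre_columnify list_of_words col_size → Spec_columnify list_of_words col_size (columnify list_of_words col_size)

-- ===== LEMMAS AND PROOFS =====

-- reference chunking: consecutive blocks of n, by fuel-bounded recursion
def chunksF : Nat → Nat → List String → List (List String)
  | 0, _, _ => []
  | fuel+1, n, r => if r = [] then [] else r.take n :: chunksF fuel n (r.drop n)

theorem columnifyInner_eq (k : Nat) : ∀ (cur rem : List String),
    columnifyInner k cur rem = (cur ++ rem.reverse.take k, (rem.reverse.drop k).reverse) := by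
  induction k with
  | zero => intro cur rem; simp [columnifyInner]
  | succ k ih =>
    intro cur rem
    rcases List.eq_nil_or_concat rem with h | ⟨l', x, h⟩
    · subst h; simp [columnifyInner]
    · subst h
      have hne : (l' ++ [x]).length ≠ 0 := by simp
      simp only [columnifyInner, ih]
      simp [List.append_assoc]

theorem columnifyOuter_eq (n : Nat) (hn : 1 ≤ n) : ∀ (fuel : Nat) (cols : List (List String)) (rem : List String),
    rem.length ≤ fuel → columnifyOuter n fuel cols rem = cols ++ chunksF fuel n rem.reverse := by
  intro fuel
  induction fuel with
  | zero =>
    intro cols rem h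
    have : rem = [] := List.eq_nil_of_length_eq_zero (Nat.le_zero.mp h)
    subst this; simp [columnifyOuter, chunksF]
  | succ fuel ih =>
    intro cols rem h
    by_cases hrem : rem.length = 0
    · have : rem = [] := List.eq_nil_of_length_eq_zero hrem
      subst this; simp [columnifyOuter, chunksF]
    · have hrev : rem.reverse ≠ [] := by
        intro hc; exact hrem (by simpa using congrArg List.length hc)
      simp only [columnifyOuter, if_neg hrem, columnifyInner_eq, List.nil_append]
      rw [ih]
      · rw [List.reverse_reverse]
        simp only [chunksF, if_neg hrev, List.append_assoc, List.singleton_append]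
      · simp only [List.length_reverse, List.length_drop]
        omega

theorem chunksF_closed (n : Nat) (hn : 1 ≤ n) : ∀ (fuel : Nat) (r : List String),
    r.length ≤ fuel →
    (List.range ((r.length + n - 1) / n)).map (fun k => (r.drop (n * k)).take n) = chunksF fuel n r := by
  intro fuel
  induction fuel with
  | zero =>
    intro r h
    have : r = [] := List.eq_nil_of_length_eq_zero (Nat.le_zero.mp h)
    subst this
    simp [chunksF, Nat.div_eq_of_lt (by omega : n - 1 < n)]
  | succ fuel ih =>
    intro r h
    by_cases hr : r = []
    · subst hr; simp [chunksF, Nat.div_eq_of_lt (by omega : n - 1 < n)]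
    · have hm : 1 ≤ r.length := by
        cases r with
        | nil => exact absurd rfl hr
        | cons a t => simp
      have hdiv : (r.length + n - 1) / n = ((r.length - n) + n - 1) / n + 1 := by
        by_cases hmn : n ≤ r.length
        · have h1 : (r.length - n) + n - 1 = (r.length + n - 1) - n := by omega
          rw [h1, ← Nat.div_eq_sub_div (by omega) (by omega)]
        · have h1 : (r.length - n) + n - 1 = n - 1 := by omega
          rw [h1, Nat.div_eq_of_lt (by omega : n - 1 < n)]
          have : r.length + n - 1 < 2 * n := by omega
          have hge : n ≤ r.length + n - 1 := by omega
          rw [Nat.div_eq_sub_div (by omega) hge, Nat.div_eq_of_lt (by omega)]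
      rw [hdiv, List.range_succ_eq_map, List.map_cons, List.map_map]
      have hfst : (r.drop (n * 0)).take n = r.take n := by simp
      have hlen : (r.drop n).length = r.length - n := by simp
      simp only [chunksF, if_neg hr]
      rw [hfst]
      congr 1
      have := ih (r.drop n) (by simp; omega)
      rw [hlen] at this
      rw [← this]
      apply List.map_congr_left
      intro k _
      simp only [Function.comp]
      rw [List.drop_drop]
      congr 2
      rw [Nat.mul_succ]
      omega

theorem columnify_alt_eq (l : List String) (c : Int) (hc : 1 ≤ c) :
    columnify_alt l c = chunksF l.length c.toNat l.reverse := by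
  obtain ⟨n, rfl⟩ : ∃ n : Nat, c = (n : Int) := ⟨c.toNat, by omega⟩
  have hn : 1 ≤ n := by exact_mod_cast hc
  unfold columnify_alt
  rw [PySem.List.slice?_none_none_neg_one]
  simp only [Option.getD_some, Int.toNat_natCast]
  rw [← chunksF_closed n hn l.length l.reverse (by simp)]
  rw [PySem.List.pyRange_of_pos 0 (l.reverse.length : Int) (by exact_mod_cast hn)]
  have hif : (if (0:Int) < (l.reverse.length : Int) then (((l.reverse.length : Int) - 0 + n - 1) / n).toNat else 0)
      = (l.reverse.length + n - 1) / n := by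
    by_cases hm : l.reverse.length = 0
    · rw [hm]; simp [Nat.div_eq_of_lt (by omega : n - 1 < n)]
    · rw [if_pos (by exact_mod_cast Nat.pos_of_ne_zero hm)]
      have h1 : ((l.reverse.length : Int) - 0 + n - 1) = ((l.reverse.length + n - 1 : Nat) : Int) := by
        omega
      rw [h1, ← Int.natCast_div, Int.toNat_natCast]
  rw [hif, List.map_map, List.length_reverse]
  apply List.map_congr_left
  intro k _
  simp only [Function.comp]
  have h0 : (0 : Int) + (n : Int) * (k : Int) = ((n * k : Nat) : Int) := by push_cast; ring
  have h1 : ((n * k : Nat) : Int) + (n : Int) = ((n * k + n : Nat) : Int) := by push_cast; ring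
  rw [h0, h1, PySem.List.slice_toNat _ (by positivity) (by positivity)]
  simp only [Int.toNat_natCast]
  congr 1
  omega

-- ===== VERDICT (by name: the statement is the Claim_ definition above) =====
theorem columnify_spec : Claim_equal_columnify := by
  intro l c _ hpre
  unfold Pre_columnify at hpre
  unfold Spec_columnify columnify
  rw [columnify_alt_eq l c hpre,
    columnifyOuter_eq c.toNat (by omega) l.length [] l (le_refl _)]
  simp
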